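-- pv_equiv track=rewrite | github.com/JSYoo5B/TIL | PS/BOJ/1525/1525.py | nonary_to_puzzle
-- ===== SOURCE A (Python) =====
-- def nonary_to_puzzle(nonary):
--     puzzle = [ ]
--     for _ in range(9):
--         radix = nonary % 9
--         puzzle.append(radix)
--         nonary //= 9
--     puzzle.reverse()
--     return puzzle
-- ===== SOURCE B (Python) =====
-- def nonary_to_puzzle(nonary):
--     return [(nonary // 9**i) % 9 for i in range(8, -1, -1)]
-- ===== Notes on version B (the rewrite author's own statement) =====
-- stated objective: simpler
-- what changed: B extracts digits most-significant-first by positional division by powers of 9 in one comprehension, instead of A's loop mutating a running quotient, appending LSB-first and reversing at the end.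
import Mathlib
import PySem

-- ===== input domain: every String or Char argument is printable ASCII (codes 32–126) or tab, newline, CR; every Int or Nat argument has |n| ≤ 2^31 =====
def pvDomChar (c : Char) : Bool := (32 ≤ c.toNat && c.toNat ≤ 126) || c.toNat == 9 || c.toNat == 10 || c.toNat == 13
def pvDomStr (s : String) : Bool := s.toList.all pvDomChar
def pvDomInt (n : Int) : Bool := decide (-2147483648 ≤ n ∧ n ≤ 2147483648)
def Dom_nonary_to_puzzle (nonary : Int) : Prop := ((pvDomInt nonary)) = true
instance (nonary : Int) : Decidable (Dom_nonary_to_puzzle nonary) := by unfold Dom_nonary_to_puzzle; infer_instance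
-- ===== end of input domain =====

-- B computes each base-9 digit positionally (most-significant-first, by division by powers of 9),
-- instead of A's loop that mutates a running quotient, appends LSB-first and reverses at the end.

-- ===== PORT A =====
-- A: puzzle = []; for _ in range(9): radix = nonary % 9; puzzle.append(radix); nonary //= 9; puzzle.reverse()
def nonary_to_puzzle (nonary : Int) : List Int :=
  let s := (List.range 9).foldl
    (fun (st : List Int × Int) _ =>
      (st.1 ++ [PySem.Int.mod st.2 9], PySem.Int.floordiv st.2 9))
    ([], nonary)
  s.1.reverse

-- ===== PORT B =====
-- B: [(nonary // 9**i) % 9 for i in range(8, -1, -1)]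
-- 9**i with i ≥ 0 from the range is ported as (9 : Int) ^ i.toNat (exact: i ∈ [8,…,0] is nonnegative).
def nonary_to_puzzle_alt (nonary : Int) : List Int :=
  (PySem.List.pyRange 8 (-1) (-1)).map
    (fun i => PySem.Int.mod (PySem.Int.floordiv nonary ((9 : Int) ^ i.toNat)) 9)

-- ===== PRECONDITION & SPEC =====
def Spec_nonary_to_puzzle (nonary : Int) (out : List Int) : Prop := out = nonary_to_puzzle_alt nonary
instance (nonary : Int) (out : List Int) : Decidable (Spec_nonary_to_puzzle nonary out) := by unfold Spec_nonary_to_puzzle; infer_instance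

-- ===== CLAIM (what is proved, stated in full; the proofs are below) =====
def Claim_equal_nonary_to_puzzle : Prop := ∀ (nonary : Int), Dom_nonary_to_puzzle nonary → Spec_nonary_to_puzzle nonary (nonary_to_puzzle nonary)

-- ===== LEMMAS AND PROOFS =====

-- a // p // q = a // (p*q) for positive divisors (Python floor division)
theorem fdiv_fdiv (a : Int) (p q : Int) (hp : 0 < p) (hq : 0 < q) :
    PySem.Int.floordiv (PySem.Int.floordiv a p) q = PySem.Int.floordiv a (p * q) := by
  rw [PySem.Int.floordiv_eq_ediv_of_pos hp, PySem.Int.floordiv_eq_ediv_of_pos hq,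
      PySem.Int.floordiv_eq_ediv_of_pos (mul_pos hp hq)]
  exact Int.ediv_ediv_of_nonneg (le_of_lt hp)

-- loop invariant for A: after k iterations the list holds the k low digits
-- (LSB first) and the running value is nonary // 9^k
theorem loopA_inv (n : Int) (k : Nat) :
    (List.range k).foldl
      (fun (st : List Int × Int) _ =>
        (st.1 ++ [PySem.Int.mod st.2 9], PySem.Int.floordiv st.2 9))
      ([], n)
    = ((List.range k).map (fun j => PySem.Int.mod (PySem.Int.floordiv n ((9 : Int) ^ j)) 9),
       PySem.Int.floordiv n ((9 : Int) ^ k)) := by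
  induction k with
  | zero => simp
  | succ k ih =>
      rw [List.range_succ, List.foldl_append, ih]
      simp only [List.foldl_cons, List.foldl_nil, List.map_append, List.map_cons, List.map_nil]
      rw [fdiv_fdiv n _ 9 (pow_pos (by norm_num) k) (by norm_num), pow_succ]

theorem nonary_to_puzzle_spec : Claim_equal_nonary_to_puzzle := by
  intro n _
  unfold Spec_nonary_to_puzzle nonary_to_puzzle nonary_to_puzzle_alt
  rw [loopA_inv]
  have hr : PySem.List.pyRange 8 (-1) (-1) = [8, 7, 6, 5, 4, 3, 2, 1, 0] := by decide
  rw [hr]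
  simp [List.range_succ]
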